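-- pv_equiv track=rewrite | github.com/cnam0203/artery_reconstruction | slice_selection.py | find_extend_paths
-- ===== SOURCE A (Python) =====
-- def find_extend_paths(path_index, common_paths):
--     path = common_paths[path_index]
--     point_1 = path[0]
--     point_2 = path[1]
--     extend_point_1 = point_1
--     extend_point_2 = point_2
--
--     for i, path in enumerate(common_paths):
--         if i != path_index:
--             if point_1 == path[0]:
--                 extend_point_1 = path[1]
--                 break
--             elif point_1 == path[1]:
--                 extend_point_1 = path[0]
--                 break
--
--     for i, path in enumerate(common_paths):
--         if i != path_index:
--             if point_2 == path[0]:
--                 extend_point_2 = path[1]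
--                 break
--             elif point_2 == path[1]:
--                 extend_point_2 = path[0]
--                 break
--
--     return [extend_point_1, extend_point_2]
-- ===== SOURCE B (Python) =====
-- def find_extend_paths(path_index, common_paths):
--     path = common_paths[path_index]
--     point_1 = path[0]
--     point_2 = path[1]
--     extend_point_1 = point_1
--     extend_point_2 = point_2
--     found_1 = False
--     found_2 = False
--
--     for i, path in enumerate(common_paths):
--         if found_1 and found_2:
--             break
--         if i == path_index:
--             continue
--         if not found_1:
--             if point_1 == path[0]:
--                 extend_point_1 = path[1]
--                 found_1 = True
--             elif point_1 == path[1]: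
--                 extend_point_1 = path[0]
--                 found_1 = True
--         if not found_2:
--             if point_2 == path[0]:
--                 extend_point_2 = path[1]
--                 found_2 = True
--             elif point_2 == path[1]:
--                 extend_point_2 = path[0]
--                 found_2 = True
--
--     return [extend_point_1, extend_point_2]
-- ===== Notes on version B (the rewrite author's own statement) =====
-- stated objective: alternative
-- what changed: The two sequential whole-list scans (one per endpoint) are fused into a single enumerate loop carrying found_1/found_2 flags that resolves both endpoints independently and breaks as soon as both are found.
import Mathlib
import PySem

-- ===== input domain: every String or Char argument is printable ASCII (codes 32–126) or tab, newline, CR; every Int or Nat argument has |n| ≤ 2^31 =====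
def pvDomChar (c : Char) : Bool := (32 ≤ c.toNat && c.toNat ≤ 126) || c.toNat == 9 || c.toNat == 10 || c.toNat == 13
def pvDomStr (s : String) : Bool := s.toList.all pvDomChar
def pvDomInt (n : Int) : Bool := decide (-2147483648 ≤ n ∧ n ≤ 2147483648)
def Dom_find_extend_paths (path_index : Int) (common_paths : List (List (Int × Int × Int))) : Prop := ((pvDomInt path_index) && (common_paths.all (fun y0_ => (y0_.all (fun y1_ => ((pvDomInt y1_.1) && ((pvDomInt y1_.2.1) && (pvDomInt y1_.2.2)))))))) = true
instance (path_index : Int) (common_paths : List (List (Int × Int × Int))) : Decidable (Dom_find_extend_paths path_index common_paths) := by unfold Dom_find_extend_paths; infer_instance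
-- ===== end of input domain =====

-- B fuses A's two sequential whole-list scans into one enumerate loop with found_1/found_2
-- flags, resolving both endpoints independently and breaking once both are found (objective: alternative).

-- ===== PORT A =====
-- path[0] / path[1]; inside Pre_ every path has length ≥ 2, so the default is never used
def pvFst (p : List (Int × Int × Int)) : Int × Int × Int := p.getD 0 (0, 0, 0)
def pvSnd (p : List (Int × Int × Int)) : Int × Int × Int := p.getD 1 (0, 0, 0)

-- one of A's two 'for i, path in enumerate(common_paths)' loops with break; acc = the
-- current extend_point (its initial value, returned if the loop never breaks)
def pvScanA (point : Int × Int × Int) (path_index : Int) :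
    List (Int × List (Int × Int × Int)) → (Int × Int × Int) → (Int × Int × Int)
  | [], acc => acc
  | (i, p) :: rest, acc =>
    if i ≠ path_index then
      if point = pvFst p then pvSnd p
      else if point = pvSnd p then pvFst p
      else pvScanA point path_index rest acc
    else pvScanA point path_index rest acc

def find_extend_paths (path_index : Int) (common_paths : List (List (Int × Int × Int))) : List (Int × Int × Int) :=
  let path := (PySem.List.pyGet? common_paths path_index).getD []
  let point_1 := pvFst path
  let point_2 := pvSnd path
  let extend_point_1 := pvScanA point_1 path_index (PySem.List.enumerate common_paths) point_1
  let extend_point_2 := pvScanA point_2 path_index (PySem.List.enumerate common_paths) point_2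
  [extend_point_1, extend_point_2]

-- ===== PORT B =====
-- B's single fused loop: state (found_1, extend_point_1, found_2, extend_point_2)
def pvScanB (point_1 point_2 : Int × Int × Int) (path_index : Int) :
    List (Int × List (Int × Int × Int)) →
    Bool → (Int × Int × Int) → Bool → (Int × Int × Int) →
    (Int × Int × Int) × (Int × Int × Int)
  | [], _, e1, _, e2 => (e1, e2)
  | (i, p) :: rest, f1, e1, f2, e2 =>
    if f1 && f2 then (e1, e2)
    else if i = path_index then pvScanB point_1 point_2 path_index rest f1 e1 f2 e2
    else
      let s1 : Bool × (Int × Int × Int) :=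
        if !f1 then
          if point_1 = pvFst p then (true, pvSnd p)
          else if point_1 = pvSnd p then (true, pvFst p)
          else (f1, e1)
        else (f1, e1)
      let s2 : Bool × (Int × Int × Int) :=
        if !f2 then
          if point_2 = pvFst p then (true, pvSnd p)
          else if point_2 = pvSnd p then (true, pvFst p)
          else (f2, e2)
        else (f2, e2)
      pvScanB point_1 point_2 path_index rest s1.1 s1.2 s2.1 s2.2

def find_extend_paths_alt (path_index : Int) (common_paths : List (List (Int × Int × Int))) : List (Int × Int × Int) :=
  let path := (PySem.List.pyGet? common_paths path_index).getD []
  let point_1 := pvFst path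
  let point_2 := pvSnd path
  let r := pvScanB point_1 point_2 path_index (PySem.List.enumerate common_paths)
            false point_1 false point_2
  [r.1, r.2]

-- ===== PRECONDITION & SPEC =====
-- Pre_ requires an in-range index (Python's negative indexing included) and every path to
-- have ≥ 2 points: with a shorter path A almost always raises IndexError on path[0]/path[1];
-- it does exclude the rare inputs where both of A's scans break before reaching the short
-- path and A still returns (see claim cites).
def Pre_find_extend_paths (path_index : Int) (common_paths : List (List (Int × Int × Int))) : Prop :=
  (-(common_paths.length : Int) ≤ path_index ∧ path_index < (common_paths.length : Int)) ∧
  ∀ p ∈ common_paths, 2 ≤ p.length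
instance (path_index : Int) (common_paths : List (List (Int × Int × Int))) : Decidable (Pre_find_extend_paths path_index common_paths) := by unfold Pre_find_extend_paths; infer_instance

def pvWitness_find_extend_paths : Int × (List (List (Int × Int × Int))) :=
  (0, [[(0, 0, 0), (1, 1, 1)], [(1, 1, 1), (2, 2, 2)]])

def Spec_find_extend_paths (path_index : Int) (common_paths : List (List (Int × Int × Int))) (out : List (Int × Int × Int)) : Prop := out = find_extend_paths_alt path_index common_paths
instance (path_index : Int) (common_paths : List (List (Int × Int × Int))) (out : List (Int × Int × Int)) : Decidable (Spec_find_extend_paths path_index common_paths out) := by unfold Spec_find_extend_paths; infer_instance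

-- ===== CLAIM (what is proved, stated in full; the proofs are below) =====
def Claim_equal_find_extend_paths : Prop := ∀ (path_index : Int) (common_paths : List (List (Int × Int × Int))), Dom_find_extend_paths path_index common_paths → Pre_find_extend_paths path_index common_paths → Spec_find_extend_paths path_index common_paths (find_extend_paths path_index common_paths)

-- ===== LEMMAS AND PROOFS =====

-- The fused loop computes exactly the two independent scans: a found flag freezes its
-- component, an unresolved component ends up being its scan of the rest of the list.
theorem pvScanB_eq (point_1 point_2 : Int × Int × Int) (path_index : Int)
    (l : List (Int × List (Int × Int × Int)))
    (f1 f2 : Bool) (e1 e2 : Int × Int × Int) :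
    pvScanB point_1 point_2 path_index l f1 e1 f2 e2 =
      ((if f1 then e1 else pvScanA point_1 path_index l e1),
       (if f2 then e2 else pvScanA point_2 path_index l e2)) := by
  induction l generalizing f1 f2 e1 e2 with
  | nil => cases f1 <;> cases f2 <;> simp [pvScanB, pvScanA]
  | cons hd rest ih =>
    obtain ⟨i, p⟩ := hd
    cases f1 <;> cases f2 <;>
      simp only [pvScanB, pvScanA, Bool.and_self, Bool.and_false, Bool.false_and,
        Bool.not_true, Bool.not_false, if_true, ite_not] <;>
      by_cases hip : i = path_index <;>
      simp [hip, ih] <;>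
      by_cases h1 : point_1 = pvFst p <;>
      by_cases h2 : point_2 = pvFst p <;>
      simp [h1, h2] <;>
      by_cases h1' : point_1 = pvSnd p <;>
      by_cases h2' : point_2 = pvSnd p <;>
      simp [h1', h2']

-- ===== VERDICT (by name: the statement is the Claim_ definition above) =====
theorem find_extend_paths_spec : Claim_equal_find_extend_paths := by
  intro path_index common_paths _ _
  unfold Spec_find_extend_paths find_extend_paths find_extend_paths_alt
  simp [pvScanB_eq]
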